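-- pv_equiv track=rewrite | github.com/heloint/phylomedb6 | phylo-data-services/external-sources/get_orthologs_report/get_orthologs_report/get_orthologs_report.py | resolve_tree_rooting_dictionary
-- ===== SOURCE A (Python) =====
-- def resolve_tree_rooting_dictionary(counter: dict[int, int]) -> dict[int, int]:
--     """
--     Resolves the tree rooting dictionary from the previously generated
--     topology difference counter to the seed taxonomy lineage.
--
--     @param counter The previously generated topology difference
--                    counter to the seed taxonomy lineage.
--     @returns Dictionary, where the keys are taxonomy IDs as integers,
--              and the values are the order numbers.
--     """
--     sorted_counter: dict[int, int] = {
--         k: v for k, v in sorted(counter.items(), key=lambda item: item[1])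
--     }
--     unique_counter_values: list[int] = sorted(
--         list(set(sorted_counter.values()))
--     )
--     converted_counter_values: dict[int, int] = {
--         value: idx + 1 for idx, value in enumerate(unique_counter_values)
--     }
--
--     resolved_tree_rooting_dict: dict[int, int] = {
--         taxid: converted_counter_values[counter_value]
--         for taxid, counter_value in sorted_counter.items()
--     }
--     return resolved_tree_rooting_dict
-- ===== SOURCE B (Python) =====
-- def resolve_tree_rooting_dictionary(counter: dict[int, int]) -> dict[int, int]:
--     result: dict[int, int] = {}
--     prev = None
--     rank = 0
--     for taxid, value in sorted(counter.items(), key=lambda item: item[1]):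
--         if value != prev:
--             rank += 1
--             prev = value
--         result[taxid] = rank
--     return result
-- ===== Notes on version B (the rewrite author's own statement) =====
-- stated objective: simpler
-- what changed: Replaces A's four-stage pipeline (rebuild dict from sorted items, collect the set of values, sort it, build a value->rank dict, then a second pass looking ranks up) by one pass over the sorted items that keeps a previous-value/running-rank state and writes taxid->rank directly, with no intermediate set, unique-value list or rank table.
import Mathlib
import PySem

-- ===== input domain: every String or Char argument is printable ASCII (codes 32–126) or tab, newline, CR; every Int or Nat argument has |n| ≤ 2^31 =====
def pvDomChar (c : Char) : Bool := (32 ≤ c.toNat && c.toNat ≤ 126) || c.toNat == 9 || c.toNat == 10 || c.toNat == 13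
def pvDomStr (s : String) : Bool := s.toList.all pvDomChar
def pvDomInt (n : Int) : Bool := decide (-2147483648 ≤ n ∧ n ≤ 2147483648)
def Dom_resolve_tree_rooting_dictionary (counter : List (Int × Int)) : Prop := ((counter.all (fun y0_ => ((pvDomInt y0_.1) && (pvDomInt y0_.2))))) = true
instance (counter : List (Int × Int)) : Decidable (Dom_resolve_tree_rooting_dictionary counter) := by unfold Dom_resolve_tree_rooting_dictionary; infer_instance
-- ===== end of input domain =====

-- B replaces A's four-stage pipeline (sorted-items dict, value set, sorted unique values, value->rank
-- table, second lookup pass) by a single pass over the sorted items with a previous-value/running-rank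
-- state; objective: simpler.


-- ===== PORT A =====
def resolve_tree_rooting_dictionary (counter : List (Int × Int)) : List (Int × Int) :=
  -- sorted_counter = {k: v for k, v in sorted(counter.items(), key=lambda item: item[1])}
  let sorted_counter : PySem.Dict Int Int :=
    (PySem.List.sorted counter (fun item => item.2)).foldl
      (fun d kv => d.insert kv.1 kv.2) PySem.Dict.empty
  -- unique_counter_values = sorted(list(set(sorted_counter.values())))
  let unique_counter_values : List Int :=
    PySem.List.sorted (PySem.Set.ofList sorted_counter.values) (fun v => v)
  -- converted_counter_values = {value: idx + 1 for idx, value in enumerate(unique_counter_values)}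
  let converted_counter_values : PySem.Dict Int Int :=
    (PySem.List.enumerate unique_counter_values).foldl
      (fun d p => d.insert p.2 (p.1 + 1)) PySem.Dict.empty
  -- {taxid: converted_counter_values[counter_value] for taxid, counter_value in sorted_counter.items()}
  -- converted_counter_values[counter_value]: the key is always present (every value of sorted_counter
  -- is in the unique-value list), so the always-successful lookup is ported as getD with an
  -- unreachable default; exact on every input.
  (sorted_counter.items.foldl
    (fun d kv => d.insert kv.1 (converted_counter_values.getD kv.2 0)) PySem.Dict.empty).items

-- ===== PORT B =====
def resolve_tree_rooting_dictionary_alt (counter : List (Int × Int)) : List (Int × Int) :=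
  -- state: (prev, rank, result); 'if value != prev: rank += 1; prev = value'; 'result[taxid] = rank'
  ((PySem.List.sorted counter (fun item => item.2)).foldl
      (fun st kv =>
        let rank := if st.1 ≠ some kv.2 then st.2.1 + 1 else st.2.1
        (some kv.2, rank, st.2.2.insert kv.1 rank))
      ((none : Option Int), (0 : Int), (PySem.Dict.empty : PySem.Dict Int Int))).2.2.items

-- ===== PRECONDITION & SPEC =====
-- Pre_ excludes association lists with duplicate taxid keys: the Python function takes a dict, whose
-- item list always has distinct keys, so such lists do not represent any Python input.
def Pre_resolve_tree_rooting_dictionary (counter : List (Int × Int)) : Prop :=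
  (counter.map Prod.fst).Nodup
instance (counter : List (Int × Int)) : Decidable (Pre_resolve_tree_rooting_dictionary counter) := by unfold Pre_resolve_tree_rooting_dictionary; infer_instance

def pvWitness_resolve_tree_rooting_dictionary : (List (Int × Int)) := [(9606, 3), (10090, 1), (7227, 3), (4932, 0)]

def Spec_resolve_tree_rooting_dictionary (counter : List (Int × Int)) (out : List (Int × Int)) : Prop := out = resolve_tree_rooting_dictionary_alt counter
instance (counter : List (Int × Int)) (out : List (Int × Int)) : Decidable (Spec_resolve_tree_rooting_dictionary counter out) := by unfold Spec_resolve_tree_rooting_dictionary; infer_instance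

-- ===== CLAIM (what is proved, stated in full; the proofs are below) =====
def Claim_equal_resolve_tree_rooting_dictionary : Prop := ∀ (counter : List (Int × Int)), Dom_resolve_tree_rooting_dictionary counter → Pre_resolve_tree_rooting_dictionary counter → Spec_resolve_tree_rooting_dictionary counter (resolve_tree_rooting_dictionary counter)

-- ===== LEMMAS AND PROOFS =====

-- the common rank function both loops are reduced to: 1 + number of distinct values below v,
-- computed against the (strictly sorted, duplicate-free) unique-value list u
def pvF (u : List Int) (v : Int) : Int := ((u.filter (fun w => decide (w ≤ v))).length : Int)

-- B's 'value already seen' test as a Bool predicate on the running prev state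
def pvLow : Option Int → Int → Bool := fun prev w =>
  match prev with
  | none => false
  | some p => decide (w ≤ p)

lemma pv_mem_enumerate {α : Type} : ∀ (u : List α) (s : Int) (i : ℕ) (h : i < u.length),
    ((s + (i : Int)), u[i]) ∈ PySem.List.enumerate u s := by
  intro u
  induction u with
  | nil => intro s i h; simp at h
  | cons x t ih =>
    intro s i h
    cases i with
    | zero => simp [PySem.List.enumerate]
    | succ j =>
      have hj : j < t.length := by simpa using h
      have := ih (s + 1) j hj
      have harith : s + ((j : Int) + 1) = (s + 1) + (j : Int) := by ring
      simp only [PySem.List.enumerate, List.mem_cons]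
      right
      push_cast
      rw [harith]
      simpa using this

lemma pv_filter_le_getElem : ∀ (u : List Int), List.Pairwise (· < ·) u →
    ∀ (i : ℕ) (h : i < u.length), (u.filter (fun w => decide (w ≤ u[i]))).length = i + 1 := by
  intro u
  induction u with
  | nil => intro _ i h; simp at h
  | cons x t ih =>
    intro hpw i h
    have hx : ∀ w ∈ t, x < w := fun w hw => (List.pairwise_cons.mp hpw).1 w hw
    have ht := (List.pairwise_cons.mp hpw).2
    cases i with
    | zero =>
      have hnil : t.filter (fun w => decide (w ≤ x)) = [] := by
        apply List.filter_eq_nil_iff.mpr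
        intro w hw
        simpa using not_le.mpr (hx w hw)
      simp [List.filter_cons]
      exact hx
    | succ j =>
      have hj : j < t.length := by simpa using h
      have hle : x ≤ t[j] := le_of_lt (hx _ (List.getElem_mem hj))
      have := ih ht j hj
      simp [List.filter_cons, hle]
      exact this

lemma pv_conv_getD (u : List Int) (hnd : u.Nodup) (hpw : List.Pairwise (· < ·) u)
    (v : Int) (hv : v ∈ u) :
    ((PySem.List.enumerate u).foldl (fun d p => d.insert p.2 (p.1 + 1)) PySem.Dict.empty).getD v 0
      = pvF u v := by
  obtain ⟨i, h, rfl⟩ := List.mem_iff_getElem.mp hv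
  have hkeys : (PySem.List.enumerate u 0).map (fun p => p.2) = u := PySem.List.map_snd_enumerate u 0
  have hitems :
      ((PySem.List.enumerate u).foldl (fun d p => d.insert p.2 (p.1 + 1)) PySem.Dict.empty).items
        = List.map (fun p => (p.2, p.1 + 1)) (PySem.List.enumerate u 0) := by
    have := PySem.Dict.items_foldl_insert_fresh (PySem.List.enumerate u 0)
      (fun p => p.2) (fun p => p.1 + 1) PySem.Dict.empty
      (by intro a _; simp [PySem.Dict.contains_empty])
      (by rw [hkeys]; exact hnd)
    simpa [PySem.Dict.empty] using this
  have hmem : ((i : Int), u[i]) ∈ PySem.List.enumerate u 0 := by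
    simpa using pv_mem_enumerate u 0 i h
  have hinit : (u[i], (i : Int) + 1)
      ∈ ((PySem.List.enumerate u).foldl (fun d p => d.insert p.2 (p.1 + 1)) PySem.Dict.empty).items := by
    rw [hitems]
    exact List.mem_map.mpr ⟨((i : Int), u[i]), hmem, rfl⟩
  have hknd : ((PySem.List.enumerate u).foldl
      (fun d p => d.insert p.2 (p.1 + 1)) PySem.Dict.empty).keys.Nodup := by
    simp only [PySem.Dict.keys, hitems, List.map_map]
    have : ((fun p : Int × Int => p.1) ∘ fun p : Int × Int => (p.2, p.1 + 1)) = fun p => p.2 := rfl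
    rw [this, hkeys]
    exact hnd
  have := PySem.Dict.getD_of_mem_items _ hinit hknd 0
  rw [this, pvF, pv_filter_le_getElem u hpw i h]
  push_cast
  ring

lemma pv_count_step : ∀ (u : List Int) (q r : Int → Bool) (a : Int), u.Nodup → a ∈ u →
    (∀ w ∈ u, (q w = true ∧ r w = false) ↔ w = a) →
    (∀ w ∈ u, r w = true → q w = true) →
    (u.filter q).length = (u.filter r).length + 1 := by
  intro u
  induction u with
  | nil => intro q r a _ ha; simp at ha
  | cons x t ih =>
    intro q r a hnd ha hpt himp
    have hxt : x ∉ t := (List.nodup_cons.mp hnd).1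
    have hndt := (List.nodup_cons.mp hnd).2
    by_cases hx : x = a
    · subst hx
      have hq : q x = true ∧ r x = false := (hpt x (List.mem_cons_self)).mpr rfl
      have hft : t.filter q = t.filter r := by
        apply List.filter_congr
        intro w hw
        have hwa : w ≠ x := fun hwx => hxt (hwx ▸ hw)
        cases hrw : r w with
        | true => exact himp w (List.mem_cons_of_mem _ hw) hrw
        | false =>
          cases hqw : q w with
          | true => exact absurd ((hpt w (List.mem_cons_of_mem _ hw)).mp ⟨hqw, hrw⟩) hwa
          | false => rfl
      simp [List.filter_cons, hq.1, hq.2, hft]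
    · have hat : a ∈ t := by
        rcases List.mem_cons.mp ha with h | h
        · exact absurd h.symm hx
        · exact h
      have hqr : q x = r x := by
        cases hrx : r x with
        | true => exact himp x List.mem_cons_self hrx
        | false =>
          cases hqx : q x with
          | true => exact absurd ((hpt x List.mem_cons_self).mp ⟨hqx, hrx⟩) hx
          | false => rfl
      have hrec := ih q r a hndt hat
        (fun w hw => hpt w (List.mem_cons_of_mem _ hw))
        (fun w hw => himp w (List.mem_cons_of_mem _ hw))
      cases hrx : r x with
      | true => simp [List.filter_cons, hqr ▸ hrx, hrx, hrec]
      | false => simp [List.filter_cons, hqr ▸ hrx, hrx, hrec]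

lemma pv_rank_step (u : List Int) (hnd : u.Nodup) (prev : Option Int) (a : Int) (ha : a ∈ u)
    (hne : prev ≠ some a)
    (hple : ∀ p, prev = some p → p ≤ a)
    (hcov : ∀ w ∈ u, pvLow prev w = true ∨ a ≤ w) :
    pvF u a = ((u.filter (pvLow prev)).length : Int) + 1 := by
  have h := pv_count_step u (fun w => decide (w ≤ a)) (pvLow prev) a hnd ha
    (by
      intro w hw
      constructor
      · rintro ⟨hq, hr⟩
        rcases hcov w hw with h' | h'
        · exact absurd h' (by simp [hr])
        · exact le_antisymm (by simpa using hq) h'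
      · rintro rfl
        refine ⟨by simp, ?_⟩
        cases hprev : prev with
        | none => simp [pvLow]
        | some p =>
          have hpa : p ≤ w := hple p hprev
          have hpw : p ≠ w := fun h => hne (by rw [hprev, h])
          simp only [pvLow, decide_eq_false_iff_not]
          omega
    )
    (by
      intro w hw hr
      cases hprev : prev with
      | none => simp [hprev, pvLow] at hr
      | some p =>
        have : w ≤ p := by simpa [hprev, pvLow] using hr
        exact decide_eq_true (le_trans this (hple p hprev)))
  rw [pvF, h]
  push_cast
  ring

lemma pv_alt_inv (u : List Int) (hnd : u.Nodup) :
    ∀ (t : List (Int × Int)) (prev : Option Int) (rank : Int) (d : PySem.Dict Int Int),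
    List.Pairwise (fun a b => a.2 ≤ b.2) t →
    (∀ b ∈ t, b.2 ∈ u) →
    (∀ b ∈ t, ∀ p, prev = some p → p ≤ b.2) →
    (∀ w ∈ u, pvLow prev w = true ∨ ∃ b ∈ t, w = b.2) →
    rank = ((u.filter (pvLow prev)).length : Int) →
    (t.foldl
        (fun st kv =>
          let rank := if st.1 ≠ some kv.2 then st.2.1 + 1 else st.2.1
          (some kv.2, rank, st.2.2.insert kv.1 rank))
        (prev, rank, d)).2.2
      = t.foldl (fun d a => d.insert a.1 (pvF u a.2)) d := by
  intro t
  induction t with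
  | nil => intro prev rank d _ _ _ _ _; rfl
  | cons a t' ih =>
    intro prev rank d hpw hmem hord hcov hrank
    have hpc := List.pairwise_cons.mp hpw
    have hR : (if prev ≠ some a.2 then rank + 1 else rank) = pvF u a.2 := by
      by_cases hpe : prev = some a.2
      · rw [if_neg (fun h => h hpe), hrank, hpe]
        rfl
      · rw [if_pos hpe, hrank]
        exact (pv_rank_step u hnd prev a.2 (hmem a List.mem_cons_self)
          hpe (fun p hp => hord a List.mem_cons_self p hp)
          (fun w hw => by
            rcases hcov w hw with h | ⟨b, hb, rfl⟩
            · exact Or.inl h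
            · rcases List.mem_cons.mp hb with rfl | hb'
              · exact Or.inr le_rfl
              · exact Or.inr (hpc.1 b hb'))).symm
    simp only [List.foldl_cons]
    rw [hR]
    exact ih (some a.2) (pvF u a.2) (d.insert a.1 (pvF u a.2)) hpc.2
      (fun b hb => hmem b (List.mem_cons_of_mem _ hb))
      (fun b hb p hp => by
        have : a.2 = p := Option.some.inj hp
        exact this ▸ hpc.1 b hb)
      (fun w hw => by
        rcases hcov w hw with h | ⟨b, hb, rfl⟩
        · cases hprev : prev with
          | none => rw [hprev] at h; simp [pvLow] at h
          | some p =>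
            rw [hprev] at h
            have hwp : w ≤ p := by simpa [pvLow] using h
            have hpa : p ≤ a.2 := hord a List.mem_cons_self p hprev
            refine Or.inl ?_
            simp only [pvLow, decide_eq_true_eq]
            omega
        · rcases List.mem_cons.mp hb with rfl | hb'
          · exact Or.inl (by simp [pvLow])
          · exact Or.inr ⟨b, hb', rfl⟩)
      rfl

-- ===== VERDICT (by name: the statement is the Claim_ definition above) =====
theorem resolve_tree_rooting_dictionary_spec : Claim_equal_resolve_tree_rooting_dictionary := by
  intro counter _hdom hpre
  unfold Spec_resolve_tree_rooting_dictionary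
  simp only [resolve_tree_rooting_dictionary, resolve_tree_rooting_dictionary_alt]
  set s0 := PySem.List.sorted counter (fun item => item.2) with hs0
  have hsperm : s0.Perm counter := PySem.List.sorted_perm counter (fun item => item.2) false
  have hspw : List.Pairwise (fun a b : Int × Int => a.2 ≤ b.2) s0 :=
    PySem.List.sorted_pairwise counter (fun item => item.2)
  have hfst : (s0.map (fun kv => kv.1)).Nodup := ((hsperm.map Prod.fst).nodup_iff).mpr hpre
  have hitems : (s0.foldl (fun d kv => d.insert kv.1 kv.2) PySem.Dict.empty).items = s0 := by
    have := PySem.Dict.items_foldl_insert_fresh s0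
      (fun kv => kv.1) (fun kv => kv.2) PySem.Dict.empty
      (by intro a _; simp [PySem.Dict.contains_empty]) hfst
    simpa [PySem.Dict.empty] using this
  have hvals : (s0.foldl (fun d kv => d.insert kv.1 kv.2) PySem.Dict.empty).values
      = s0.map (fun kv => kv.2) := by
    simp only [PySem.Dict.values, hitems]
  rw [hvals, hitems]
  set u := PySem.List.sorted (PySem.Set.ofList (s0.map (fun kv => kv.2))) (fun v => v) with hu
  have hupm : u.Perm (PySem.Set.ofList (s0.map (fun kv => kv.2))) :=
    PySem.List.sorted_perm _ _ false
  have hund : u.Nodup := (hupm.nodup_iff).mpr (PySem.Set.nodup_ofList _)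
  have humem : ∀ w, w ∈ u ↔ w ∈ s0.map (fun kv => kv.2) :=
    fun w => hupm.mem_iff.trans (PySem.Set.mem_ofList _ w)
  have hupw : List.Pairwise (· < ·) u := by
    have h1 : List.Pairwise (fun a b : Int => a ≤ b) u := PySem.List.sorted_pairwise _ (fun v => v)
    have h2 : List.Pairwise (· ≠ ·) u := hund
    exact (h1.and h2).imp (fun h => lt_of_le_of_ne h.1 h.2)
  rw [pv_alt_inv u hund s0 none 0 PySem.Dict.empty hspw
      (fun b hb => (humem b.2).mpr (List.mem_map_of_mem hb))
      (fun b _ p hp => by cases hp)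
      (fun w hw => Or.inr (by
        rcases List.mem_map.mp ((humem w).mp hw) with ⟨b, hb, rfl⟩
        exact ⟨b, hb, rfl⟩))
      (by
        have hnil : u.filter (pvLow none) = [] :=
          List.filter_eq_nil_iff.mpr (fun a _ => by simp [pvLow])
        simp [hnil])]
  congr 1
  apply PySem.List.foldl_congr_mem
  intro acc kv hkv
  rw [pv_conv_getD u hund hupw kv.2 ((humem kv.2).mpr (List.mem_map_of_mem hkv))]
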